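-- pv_equiv track=rewrite | github.com/keiranberry/ceng_325_cpu_gpu_organization_and_architecture | program3/emulator.py | formatForOutput
-- ===== SOURCE A (Python) =====
-- def formatForOutput(value):
--     if value < 0:
--         value = bin(value)[3:].zfill(32)
--         inverted_str = ''.join('1' if bit == '0' else '0' for bit in value)
--         carry = 1
--         result_list = []
--         for bit in reversed(inverted_str):
--             new_bit = (int(bit) + carry) % 2
--             carry = (int(bit) + carry) // 2
--             result_list.insert(0, str(new_bit))
--
--         value = ''.join(result_list)
--         value = int(value, 2)
--     return hex(value)[2:].zfill(8).upper()
-- ===== SOURCE B (Python) =====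
-- def formatForOutput(value):
--     if value < 0:
--         value += 1 << max(32, (-value).bit_length())
--     return hex(value)[2:].zfill(8).upper()
-- ===== Notes on version B (the rewrite author's own statement) =====
-- stated objective: simpler
-- what changed: The negative branch's bin-string inversion plus hand-rolled ripple-carry add-one loop is replaced by direct two's-complement arithmetic: add two raised to the width max(32, bit_length of the magnitude).
import Mathlib
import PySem

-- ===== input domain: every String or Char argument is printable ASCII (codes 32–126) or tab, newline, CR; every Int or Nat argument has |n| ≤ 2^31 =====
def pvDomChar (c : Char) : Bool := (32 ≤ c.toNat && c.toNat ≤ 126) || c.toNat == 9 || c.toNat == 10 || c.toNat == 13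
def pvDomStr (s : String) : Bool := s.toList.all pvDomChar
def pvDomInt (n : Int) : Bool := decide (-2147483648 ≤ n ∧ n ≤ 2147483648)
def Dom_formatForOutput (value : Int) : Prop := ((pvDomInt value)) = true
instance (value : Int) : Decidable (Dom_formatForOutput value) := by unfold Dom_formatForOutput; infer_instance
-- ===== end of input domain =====

-- B replaces A's invert-the-bits + hand-rolled ripple-carry add-1 string loop by direct
-- two's-complement arithmetic (value += 1 << max(32, (-value).bit_length())); simpler, same results.

-- ===== shared helper: the common final line `hex(value)[2:].zfill(8).upper()` =====
-- hex digits of n (lowercase, MSB first), i.e. hex(n)[2:] for n ≥ 1; hex(0)[2:] = "0" handled below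
def pvHexDigits (n : Nat) : List Char :=
  if n = 0 then []
  else pvHexDigits (n / 16) ++ [(Nat.digitChar (n % 16))]
-- hex(n)[2:].zfill(8).upper() for a nonnegative n (both Pythons reach this line with value ≥ 0)
def pvHexZ8U (n : Nat) : String :=
  PySem.Str.upper (PySem.Str.zfill (String.ofList (if n = 0 then ['0'] else pvHexDigits n)) 8)

-- ===== PORT A =====
-- bin(-m)[3:] : binary digits of m, MSB first, no prefix (m ≥ 1 in A's branch)
def pvToBin (m : Nat) : List Char :=
  if m = 0 then []
  else pvToBin (m / 2) ++ [if m % 2 = 1 then '1' else '0']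
-- .zfill(32) on a sign-free digit string
def pvZfill32 (l : List Char) : List Char := List.replicate (32 - l.length) '0' ++ l
-- int(s, 2) on a string of '0'/'1' chars (A's result_list only holds '0'/'1')
def pvBinVal (l : List Char) : Nat := l.foldl (fun a c => 2 * a + (if c = '1' then 1 else 0)) 0
-- one iteration of A's for-loop: state (carry, result_list); int(bit) for bit ∈ {'0','1'}
def pvStep (s : Nat × List Char) (c : Char) : Nat × List Char :=
  let b : Nat := if c = '1' then 1 else 0
  ((b + s.1) / 2, (if (b + s.1) % 2 = 1 then '1' else '0') :: s.2)

def formatForOutput (value : Int) : String :=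
  if value < 0 then
    let s := pvZfill32 (pvToBin (-value).toNat)          -- value = bin(value)[3:].zfill(32)
    let inverted := s.map (fun c => if c = '0' then '1' else '0')  -- inverted_str
    let r := inverted.reverse.foldl pvStep (1, [])       -- carry = 1; for bit in reversed(...): insert(0,...)
    pvHexZ8U (pvBinVal r.2)                              -- value = int(''.join(result_list), 2); hex(...)...
  else
    pvHexZ8U value.toNat                                 -- value ≥ 0 here

-- ===== PORT B =====
-- (-value).bit_length()
def pvBitLen (m : Nat) : Nat := if m = 0 then 0 else pvBitLen (m / 2) + 1

def formatForOutput_alt (value : Int) : String :=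
  if value < 0 then
    pvHexZ8U ((2 ^ (max 32 (pvBitLen (-value).toNat)) + value)).toNat  -- value += 1 << max(32, bit_length)
  else
    pvHexZ8U value.toNat

-- ===== PRECONDITION & SPEC =====
def Spec_formatForOutput (value : Int) (out : String) : Prop := out = formatForOutput_alt value
instance (value : Int) (out : String) : Decidable (Spec_formatForOutput value out) := by unfold Spec_formatForOutput; infer_instance

-- ===== CLAIM (what is proved, stated in full; the proofs are below) =====
def Claim_equal_formatForOutput : Prop := ∀ (value : Int), Dom_formatForOutput value → Spec_formatForOutput value (formatForOutput value)

-- ===== LEMMAS AND PROOFS =====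

def pvWF (l : List Char) : Prop := ∀ c ∈ l, c = '0' ∨ c = '1'

theorem pvBinVal_from (l : List Char) (a : Nat) :
    l.foldl (fun a c => 2 * a + (if c = '1' then 1 else 0)) a = a * 2 ^ l.length + pvBinVal l := by
  induction l generalizing a with
  | nil => simp [pvBinVal]
  | cons c t ih =>
    simp only [List.foldl_cons, List.length_cons, pvBinVal] at *
    rw [ih, ih (2 * 0 + _)]
    ring

theorem pvBinVal_cons (c : Char) (t : List Char) :
    pvBinVal (c :: t) = (if c = '1' then 1 else 0) * 2 ^ t.length + pvBinVal t := by
  simpa [pvBinVal] using pvBinVal_from t (2 * 0 + (if c = '1' then 1 else 0))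

theorem pvBinVal_append_one (l : List Char) (c : Char) :
    pvBinVal (l ++ [c]) = 2 * pvBinVal l + (if c = '1' then 1 else 0) := by
  simp [pvBinVal, List.foldl_append]

-- the ripple-carry loop: on the inverted bits of a wellformed list l, starting with carry 1,
-- it produces (carry, out) with |out| = |l| and binVal out + carry·2^|l| + binVal l = 2^|l|
theorem pvLoop_spec (l : List Char) (h : pvWF l) :
    ((l.map (fun c => if c = '0' then '1' else '0')).reverse.foldl pvStep (1, [])).2.length = l.length ∧
    pvBinVal ((l.map (fun c => if c = '0' then '1' else '0')).reverse.foldl pvStep (1, [])).2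
      + ((l.map (fun c => if c = '0' then '1' else '0')).reverse.foldl pvStep (1, [])).1 * 2 ^ l.length
      + pvBinVal l = 2 ^ l.length := by
  induction l with
  | nil => simp [pvBinVal]
  | cons a t ih =>
    obtain ⟨hlen, hval⟩ := ih (fun c hc => h c (List.mem_cons_of_mem _ hc))
    have ha := h a (List.mem_cons_self ..)
    simp only [List.map_cons, List.reverse_cons, List.foldl_append, List.foldl_cons,
      List.foldl_nil, List.length_cons] at *
    set r := (t.map (fun c => if c = '0' then '1' else '0')).reverse.foldl pvStep (1, []) with hr
    rcases ha with rfl | rfl <;>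
      simp only [pvStep, pvBinVal_cons, hlen, reduceIte, List.length_cons,
        Char.reduceEq, zero_add, one_mul, zero_mul] <;>
      constructor
    · trivial
    · -- a = '0' : inverted bit value is 1
      have hnc : (if (if (1 + r.1) % 2 = 1 then '1' else '0') = '1' then (1:ℕ) else 0)
          = (1 + r.1) % 2 := by
        rcases Nat.mod_two_eq_zero_or_one (1 + r.1) with h2 | h2 <;> simp [h2]
      rw [hnc, pow_succ]
      have key : ((1 + r.1) % 2 + 2 * ((1 + r.1) / 2)) * 2 ^ t.length = (1 + r.1) * 2 ^ t.length := by
        have : (1 + r.1) % 2 + 2 * ((1 + r.1) / 2) = 1 + r.1 := by omega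
        rw [this]
      ring_nf at key hval ⊢
      linarith [key, hval]
    · trivial
    · -- a = '1' : inverted bit value is 0
      have hnc : (if (if r.1 % 2 = 1 then '1' else '0') = '1' then (1:ℕ) else 0)
          = r.1 % 2 := by
        rcases Nat.mod_two_eq_zero_or_one r.1 with h2 | h2 <;> simp [h2]
      rw [hnc, pow_succ]
      have key : (r.1 % 2 + 2 * (r.1 / 2)) * 2 ^ t.length = r.1 * 2 ^ t.length := by
        have : r.1 % 2 + 2 * (r.1 / 2) = r.1 := by omega
        rw [this]
      ring_nf at key hval ⊢
      linarith [key, hval]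

theorem pvBinVal_toBin (m : Nat) : pvBinVal (pvToBin m) = m := by
  induction m using Nat.strong_induction_on with
  | _ m ih =>
    rw [pvToBin]
    by_cases h0 : m = 0
    · simp [h0, pvBinVal]
    · rw [if_neg h0, pvBinVal_append_one, ih (m / 2) (Nat.div_lt_self (Nat.pos_of_ne_zero h0) one_lt_two)]
      rcases Nat.mod_two_eq_zero_or_one m with h2 | h2 <;> simp [h2] <;> omega

theorem pvToBin_length (m : Nat) : (pvToBin m).length = pvBitLen m := by
  induction m using Nat.strong_induction_on with
  | _ m ih =>
    rw [pvToBin, pvBitLen]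
    by_cases h0 : m = 0
    · simp [h0]
    · rw [if_neg h0, if_neg h0]
      simp [ih (m / 2) (Nat.div_lt_self (Nat.pos_of_ne_zero h0) one_lt_two)]

theorem pvToBin_wf (m : Nat) : pvWF (pvToBin m) := by
  induction m using Nat.strong_induction_on with
  | _ m ih =>
    rw [pvToBin]
    by_cases h0 : m = 0
    · simp [h0, pvWF]
    · rw [if_neg h0]
      intro c hc
      rcases List.mem_append.mp hc with hc | hc
      · exact ih (m / 2) (Nat.div_lt_self (Nat.pos_of_ne_zero h0) one_lt_two) c hc
      · rcases List.mem_singleton.mp hc with rfl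
        split <;> simp

theorem pvLt_pow_bitLen (m : Nat) : m < 2 ^ pvBitLen m := by
  induction m using Nat.strong_induction_on with
  | _ m ih =>
    rw [pvBitLen]
    by_cases h0 : m = 0
    · simp [h0]
    · rw [if_neg h0]
      have := ih (m / 2) (Nat.div_lt_self (Nat.pos_of_ne_zero h0) one_lt_two)
      have : m / 2 < 2 ^ pvBitLen (m / 2) := this
      rw [pow_succ]
      omega

theorem pvZfill32_val (l : List Char) : pvBinVal (pvZfill32 l) = pvBinVal l := by
  unfold pvZfill32 pvBinVal
  rw [List.foldl_append]
  congr 1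
  induction (32 - l.length) with
  | zero => simp
  | succ k ih => simpa [List.replicate_succ] using ih

theorem pvZfill32_length (l : List Char) : (pvZfill32 l).length = max 32 l.length := by
  simp [pvZfill32]; omega

theorem pvZfill32_wf (l : List Char) (h : pvWF l) : pvWF (pvZfill32 l) := by
  intro c hc
  rcases List.mem_append.mp hc with hc | hc
  · left; exact (List.eq_of_mem_replicate hc)
  · exact h c hc

-- ===== VERDICT (by name: the statement is the Claim_ definition above) =====
theorem formatForOutput_spec : Claim_equal_formatForOutput := by
  intro value _
  unfold Spec_formatForOutput formatForOutput formatForOutput_alt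
  by_cases hneg : value < 0
  · simp only [if_pos hneg]
    set m := (-value).toNat with hm
    have hm1 : 1 ≤ m := by omega
    set l := pvZfill32 (pvToBin m) with hl
    have hwf : pvWF l := pvZfill32_wf _ (pvToBin_wf m)
    have hv : pvBinVal l = m := by rw [hl, pvZfill32_val, pvBinVal_toBin]
    have hlen : l.length = max 32 (pvBitLen m) := by
      rw [hl, pvZfill32_length, pvToBin_length]
    obtain ⟨_, hval⟩ := pvLoop_spec l hwf
    set r := (l.map (fun c => if c = '0' then '1' else '0')).reverse.foldl pvStep (1, []) with hrr
    rw [hv] at hval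
    have hmlt : m < 2 ^ l.length := by
      rw [hlen]
      calc m < 2 ^ pvBitLen m := pvLt_pow_bitLen m
        _ ≤ 2 ^ max 32 (pvBitLen m) := Nat.pow_le_pow_right (by norm_num) (le_max_right _ _)
    -- carry must be 0 since binVal l = m ≥ 1
    have hc0 : r.1 = 0 := by
      by_contra hc
      have hB : 2 ^ l.length ≤ r.1 * 2 ^ l.length :=
        Nat.le_mul_of_pos_left _ (Nat.pos_of_ne_zero hc)
      omega
    have hval0 : pvBinVal r.2 + m = 2 ^ l.length := by
      rw [hc0] at hval; simpa using hval
    have hout : pvBinVal r.2 = 2 ^ l.length - m := by omega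
    congr 1
    rw [hout, hlen]
    rw [hlen] at hmlt
    have hvm : value = -(m : ℤ) := by omega
    have hpow : ((2:ℤ) ^ max 32 (pvBitLen m)) = ((2 ^ max 32 (pvBitLen m) : ℕ) : ℤ) := by
      push_cast; ring
    rw [hvm, hpow]
    omega
  · simp [if_neg hneg]
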